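-- pv_equiv track=rewrite | github.com/Shawaiz-Project/Backend_Data_Mining | main.py | to_binary_matrix
-- ===== SOURCE A (Python) =====
-- def to_binary_matrix(transactions):
--     """
--     Convert transactions to binary presence matrix.
--     Used by some ARM engines.
--     """
--     # Get all unique items
--     all_items = set()
--     for t in transactions:
--         all_items.update(t)
--
--     all_items = sorted(all_items)
--     item_to_idx = {item: idx for idx, item in enumerate(all_items)}
--
--     # Create binary matrix
--     matrix = []
--     for t in transactions:
--         row = [0] * len(all_items)
--         for item in t:
--             if item in item_to_idx:
--                 row[item_to_idx[item]] = 1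
--         matrix.append(row)
--
--     return matrix, all_items
-- ===== SOURCE B (Python) =====
-- def to_binary_matrix(transactions):
--     """
--     Convert transactions to binary presence matrix.
--     Used by some ARM engines.
--     """
--     all_items = sorted({item for t in transactions for item in t})
--     matrix = []
--     for t in transactions:
--         tset = set(t)
--         matrix.append([1 if col in tset else 0 for col in all_items])
--     return matrix, all_items
-- ===== Notes on version B (the rewrite author's own statement) =====
-- stated objective: idiomatic
-- what changed: B drops the item-to-index dictionary and the scatter-into-a-zero-row inner loop; each row is instead gathered by iterating over the sorted column universe and testing membership in a per-transaction set.
import Mathlib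
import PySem

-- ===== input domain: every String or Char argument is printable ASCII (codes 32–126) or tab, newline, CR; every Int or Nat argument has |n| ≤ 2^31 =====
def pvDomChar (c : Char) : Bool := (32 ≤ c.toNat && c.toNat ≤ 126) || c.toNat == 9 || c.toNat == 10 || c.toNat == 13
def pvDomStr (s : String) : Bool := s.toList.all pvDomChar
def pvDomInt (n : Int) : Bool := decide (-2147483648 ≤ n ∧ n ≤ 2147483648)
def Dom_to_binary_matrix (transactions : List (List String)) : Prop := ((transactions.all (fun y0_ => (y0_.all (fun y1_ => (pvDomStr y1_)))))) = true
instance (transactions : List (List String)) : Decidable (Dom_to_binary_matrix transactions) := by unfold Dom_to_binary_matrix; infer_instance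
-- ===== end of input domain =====

-- B drops the item→index dictionary and the scatter-into-a-zero-row inner loop: each row is
-- gathered by iterating the sorted column universe and testing membership in a per-transaction set.

-- ===== PORT A =====
-- row[item_to_idx[item]] = 1: the dict stores enumerate indices, which are ≥ 0, so `.set idx.toNat`
-- is exactly Python's nonnegative in-range list assignment here.
def tbmRowStep (d : PySem.Dict String Int) (row : List Int) (item : String) : List Int :=
  match d.get? item with          -- 'if item in item_to_idx: row[item_to_idx[item]] = 1'
  | some idx => row.set idx.toNat 1
  | none => row

def to_binary_matrix (transactions : List (List String)) : List (List Int) × List String :=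
  let all_items0 : PySem.Set String :=
    transactions.foldl (fun s t => PySem.Set.update s t) PySem.Set.empty
  let all_items := PySem.List.sorted all_items0 (fun x => x) false
  let item_to_idx : PySem.Dict String Int :=
    (PySem.List.enumerate all_items 0).foldl (fun d p => d.insert p.2 p.1) PySem.Dict.empty
  let matrix := transactions.foldl (fun m t =>
    let row := t.foldl (tbmRowStep item_to_idx) (List.replicate all_items.length (0 : Int))
    m ++ [row]) ([] : List (List Int))
  (matrix, all_items)

-- ===== PORT B =====
def to_binary_matrix_alt (transactions : List (List String)) : List (List Int) × List String :=
  let all_items := PySem.List.sorted (PySem.Set.ofList transactions.flatten) (fun x => x) false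
  let matrix := transactions.foldl (fun m t =>
    let tset := PySem.Set.ofList t
    m ++ [all_items.map (fun col => if tset.contains col then (1 : Int) else 0)])
    ([] : List (List Int))
  (matrix, all_items)

-- ===== PRECONDITION & SPEC =====
def Spec_to_binary_matrix (transactions : List (List String)) (out : List (List Int) × List String) : Prop := out = to_binary_matrix_alt transactions
instance (transactions : List (List String)) (out : List (List Int) × List String) : Decidable (Spec_to_binary_matrix transactions out) := by unfold Spec_to_binary_matrix; infer_instance

-- ===== CLAIM (what is proved, stated in full; the proofs are below) =====
def Claim_equal_to_binary_matrix : Prop := ∀ (transactions : List (List String)), Dom_to_binary_matrix transactions → Spec_to_binary_matrix transactions (to_binary_matrix transactions)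

-- ===== LEMMAS AND PROOFS =====

-- the item_to_idx dict maps each element of a Nodup list A to its (unique) index in A
theorem tbm_dict_get (A : List String) (hnd : A.Nodup) (x : String) (i : Int) :
    ((PySem.List.enumerate A 0).foldl (fun d p => d.insert p.2 p.1) PySem.Dict.empty).get? x
      = some i ↔ ∃ h : i.toNat < A.length, 0 ≤ i ∧ A[i.toNat] = x := by
  have hfresh : ∀ p ∈ PySem.List.enumerate A 0,
      (PySem.Dict.empty : PySem.Dict String Int).contains p.2 = false := by
    intro p _; simp [pysem]
  have hk : (List.map (fun p : Int × String => p.2) (PySem.List.enumerate A 0)).Nodup := by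
    rw [show (fun p : Int × String => p.2) = (Prod.snd : Int × String → String) from rfl,
      PySem.List.map_snd_enumerate]; exact hnd
  have hitems := PySem.Dict.items_foldl_insert_fresh (PySem.List.enumerate A 0)
      (fun p => p.2) (fun p => p.1) PySem.Dict.empty hfresh hk
  constructor
  · intro hget
    have hmem := PySem.Dict.mem_items_of_get?_eq_some _ hget
    rw [hitems, show (PySem.Dict.empty : PySem.Dict String Int).items = [] from rfl,
      List.nil_append, List.mem_map] at hmem
    obtain ⟨p, hp, hpe⟩ := hmem
    rw [PySem.List.mem_enumerate_iff] at hp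
    obtain ⟨k, hk2, rfl⟩ := hp
    simp only [Prod.mk.injEq] at hpe
    obtain ⟨h1, h2⟩ := hpe
    subst h2
    refine ⟨by simpa using hk2, by positivity, ?_⟩
    simpa using h1
  · rintro ⟨h, hnn, rfl⟩
    apply PySem.Dict.get?_of_mem_items
    · rw [hitems, show (PySem.Dict.empty : PySem.Dict String Int).items = [] from rfl,
        List.nil_append]
      refine List.mem_map.mpr ⟨(i, A[i.toNat]), ?_, rfl⟩
      rw [PySem.List.mem_enumerate_iff]
      exact ⟨i.toNat, h, by simp [Int.toNat_of_nonneg hnn]⟩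
    · show (((PySem.List.enumerate A 0).foldl (fun d p => d.insert p.2 p.1)
        (PySem.Dict.empty : PySem.Dict String Int)).items.map (·.1)).Nodup
      rw [hitems, show (PySem.Dict.empty : PySem.Dict String Int).items = [] from rfl,
        List.nil_append, List.map_map]
      simpa [Function.comp_def] using hk

theorem tbm_row_len (d : PySem.Dict String Int) (t : List String) (row : List Int) :
    (t.foldl (tbmRowStep d) row).length = row.length := by
  induction t generalizing row with
  | nil => rfl
  | cons x t ih =>
    rw [List.foldl_cons, ih]
    unfold tbmRowStep
    cases d.get? x <;> simp

-- the scatter loop characterised pointwise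
theorem tbm_row_char (A : List String) (hnd : A.Nodup)
    (d : PySem.Dict String Int)
    (hd : ∀ x i, d.get? x = some i ↔ ∃ h : i.toNat < A.length, 0 ≤ i ∧ A[i.toNat] = x)
    (t : List String) (row : List Int) (hlen : row.length = A.length)
    (j : Nat) (hj : j < A.length) :
    (t.foldl (tbmRowStep d) row)[j]? = some (if A[j] ∈ t then 1 else row[j]'(by omega)) := by
  induction t generalizing row with
  | nil =>
    rw [List.foldl_nil, List.getElem?_eq_getElem (by omega)]
    simp
  | cons x t ih =>
    rw [List.foldl_cons]
    cases hget : d.get? x with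
    | none =>
      have hrs : tbmRowStep d row x = row := by unfold tbmRowStep; rw [hget]
      rw [hrs, ih row hlen]
      by_cases hmem : A[j] ∈ t
      · simp [hmem]
      · have hxA : x ∉ A := by
          intro hxA
          obtain ⟨k, hk, rfl⟩ := List.mem_iff_getElem.mp hxA
          have : d.get? A[k] = some (k : Int) := by
            rw [hd]; exact ⟨by simpa using hk, by positivity, by simp⟩
          simp [hget] at this
        have hne : A[j] ≠ x := fun h => hxA (h ▸ List.getElem_mem hj)
        simp [hmem, hne]
    | some i =>
      obtain ⟨hi, hnn, hix⟩ := (hd x i).mp hget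
      have hrs : tbmRowStep d row x = row.set i.toNat 1 := by unfold tbmRowStep; rw [hget]
      rw [hrs, ih _ (by simp [hlen])]
      by_cases hmem : A[j] ∈ t
      · simp [hmem]
      · simp only [hmem, if_false, List.mem_cons, or_false, Option.some.injEq]
        rw [List.getElem_set]
        by_cases hjx : A[j] = x
        · have hji : i.toNat = j :=
            (hnd.getElem_inj_iff.mp (show A[j] = A[i.toNat] by rw [hjx]; exact hix.symm)).symm
          simp [hjx, hji]
        · have hne : i.toNat ≠ j := fun h => hjx (by subst h; exact hix)
          simp [hne, hjx]

-- per-transaction: the scattered row equals the gathered row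
theorem tbm_row_eq (A : List String) (hnd : A.Nodup)
    (d : PySem.Dict String Int)
    (hd : ∀ x i, d.get? x = some i ↔ ∃ h : i.toNat < A.length, 0 ≤ i ∧ A[i.toNat] = x)
    (t : List String) :
    t.foldl (tbmRowStep d) (List.replicate A.length (0 : Int))
      = A.map (fun col => if (PySem.Set.ofList t).contains col then (1 : Int) else 0) := by
  apply List.ext_getElem?
  intro j
  by_cases hj : j < A.length
  · rw [tbm_row_char A hnd d hd t _ (by simp) j hj,
      List.getElem?_map, List.getElem?_eq_getElem hj]
    have hc : ((PySem.Set.ofList t).contains A[j] = true) ↔ A[j] ∈ t := by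
      simp [PySem.Set.contains, PySem.Set.mem_ofList]
    simp only [Option.map_some, Option.some.injEq, List.getElem_replicate]
    by_cases hm : A[j] ∈ t
    · simp [hm]
    · simp only [hm, if_false]
      rw [if_neg (by simpa [hc] using hm)]
  · rw [List.getElem?_eq_none (by rw [tbm_row_len]; simpa using (by omega : A.length ≤ j)),
      List.getElem?_eq_none (by simpa using (by omega : A.length ≤ j))]

-- ===== VERDICT (by name: the statement is the Claim_ definition above) =====
theorem to_binary_matrix_spec : Claim_equal_to_binary_matrix := by
  intro transactions _
  unfold Spec_to_binary_matrix to_binary_matrix to_binary_matrix_alt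
  have hset : transactions.foldl (fun s t => PySem.Set.update s t)
      (PySem.Set.empty : PySem.Set String) = PySem.Set.ofList transactions.flatten := by
    rw [PySem.Set.ofList_eq_foldl, List.foldl_flatten]; rfl
  rw [hset]
  set A := PySem.List.sorted (PySem.Set.ofList transactions.flatten) (fun x => x) false with hA
  have hnd : A.Nodup :=
    (PySem.List.sorted_perm _ _ _).nodup_iff.mpr (PySem.Set.nodup_ofList _)
  have hd := tbm_dict_get A hnd
  refine Prod.ext ?_ rfl
  simp only
  rw [PySem.List.foldl_append_singleton_eq_map, PySem.List.foldl_append_singleton_eq_map]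
  simp only [List.nil_append]
  apply List.map_congr_left
  intro t _
  exact tbm_row_eq A hnd _ hd t
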